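-- pv_equiv track=rewrite | github.com/huntEr-lif/tubitak | üçgen kenar ve çevre bulma.py | find_triangles_and_perimeters
-- ===== SOURCE A (Python) =====
-- from itertools import combinations
--
-- def is_prime(n):
--     if n < 2:
--         return False
--     for i in range(2, int(n**0.5) + 1):
--         if n % i == 0:
--             return False
--     return True
--
-- def find_triangles_and_perimeters(start, end):
--     # Verilen aralıktaki asal sayıları bul
--     primes = [num for num in range(start, end + 1) if is_prime(num)]
--
--     # Üçlü kombinasyonları kontrol et
--     triangles = []
--     for a, b, c in combinations(primes, 3):
--         if a + b > c and a + c > b and b + c > a:  # Üçgen eşitsizliği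
--             perimeter = a + b + c
--             triangles.append((a, b, c, perimeter))
--
--     return triangles
-- ===== SOURCE B (Python) =====
-- from itertools import combinations
--
-- def find_triangles_and_perimeters(start, end):
--     # Base primes up to isqrt(end) via a list-filtering sieve (exact on |end| <= 2**31).
--     limit = int(end ** 0.5) if end >= 0 else 0
--     candidates = list(range(2, limit + 1))
--     base = []
--     while candidates:
--         p = candidates[0]
--         base.append(p)
--         candidates = [x for x in candidates[1:] if x % p != 0]
--     # n in [max(start,2), end] is prime iff no base prime p with p*p <= n divides n.
--     lo = start if start > 2 else 2
--     primes = [n for n in range(lo, end + 1)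
--               if all(n % p != 0 for p in base if p * p <= n)]
--     triangles = []
--     for a, b, c in combinations(primes, 3):
--         if a + b > c and a + c > b and b + c > a:  # triangle inequality
--             perimeter = a + b + c
--             triangles.append((a, b, c, perimeter))
--     return triangles
-- ===== Notes on version B (the rewrite author's own statement) =====
-- stated objective: alternative
-- what changed: Prime generation is replaced: instead of trial-dividing every number in [start,end] by all integers up to sqrt(n), B first builds the base primes up to isqrt(end) with a list-filtering sieve (repeatedly dropping multiples of the head) and then scans the window [max(start,2),end] testing divisibility only by base primes p with p*p <= n; the combinations/triangle-inequality loop is unchanged.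
import Mathlib
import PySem

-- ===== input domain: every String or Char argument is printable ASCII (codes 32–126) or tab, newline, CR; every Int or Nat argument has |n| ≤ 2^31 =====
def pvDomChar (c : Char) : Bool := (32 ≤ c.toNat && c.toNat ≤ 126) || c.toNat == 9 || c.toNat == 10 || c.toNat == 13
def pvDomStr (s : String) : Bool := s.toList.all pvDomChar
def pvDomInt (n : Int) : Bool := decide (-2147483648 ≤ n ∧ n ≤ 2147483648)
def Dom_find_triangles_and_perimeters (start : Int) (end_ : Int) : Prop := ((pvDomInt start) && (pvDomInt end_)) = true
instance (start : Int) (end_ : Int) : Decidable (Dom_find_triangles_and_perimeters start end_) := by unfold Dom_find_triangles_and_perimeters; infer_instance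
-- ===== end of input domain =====

-- B replaces A's per-number trial division by all integers up to sqrt(n) with a
-- list-filtering sieve of the base primes up to isqrt(end) plus a window scan that
-- divides only by those primes; the combinations/triangle loop (identical source code
-- in Source A and Source B) is the shared helper `triangles_of`.  Objective: alternative.

-- ===== PORT A =====
-- `int(n**0.5)` is ported as `Nat.sqrt n.toNat`: exact for 0 ≤ n ≤ 2^31 (float sqrt is
-- correctly rounded there, so truncation equals the integer square root).
def is_prime (n : Int) : Bool :=
  if n < 2 then false
  else (PySem.List.pyRange 2 ((Nat.sqrt n.toNat : Int) + 1) 1).all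
    (fun i => !(PySem.Int.mod n i == 0))

-- itertools.combinations(l, 3) in itertools order, via pairs of the tail
def combos2 (l : List Int) : List (Int × Int) :=
  match l with
  | [] => []
  | b :: xs => xs.map (fun c => (b, c)) ++ combos2 xs

def combos3 (l : List Int) : List (Int × Int × Int) :=
  match l with
  | [] => []
  | a :: xs => (combos2 xs).map (fun bc => (a, bc.1, bc.2)) ++ combos3 xs

-- the `for a, b, c in combinations(primes, 3): …` loop, textually identical in Source A and Source B
def triangles_of (primes : List Int) : List (Int × Int × Int × Int) :=
  (combos3 primes).foldl
    (fun tr abc =>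
      match abc with
      | (a, b, c) =>
        if a + b > c ∧ a + c > b ∧ b + c > a then tr ++ [(a, b, c, a + b + c)] else tr)
    []

def find_triangles_and_perimeters (start : Int) (end_ : Int) : List (Int × Int × Int × Int) :=
  triangles_of ((PySem.List.pyRange start (end_ + 1) 1).filter (fun num => is_prime num))

-- ===== PORT B =====
-- `while candidates: p = candidates[0]; base.append(p); candidates = [x for x in candidates[1:] if x % p != 0]`
def sieveList (l : List Int) : List Int :=
  match l with
  | [] => []
  | p :: xs => p :: sieveList (xs.filter (fun x => !(PySem.Int.mod x p == 0)))
termination_by l.length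
decreasing_by
  calc (List.filter _ xs.attach).unattach.length ≤ xs.attach.unattach.length := by
        simpa [List.length_unattach] using List.length_filter_le _ xs.attach
    _ < (p :: xs).length := by simp

def find_triangles_and_perimeters_alt (start : Int) (end_ : Int) : List (Int × Int × Int × Int) :=
  -- `int(end ** 0.5)` ported as Nat.sqrt, exact on the domain (see the PORT A comment)
  let limit : Int := if 0 ≤ end_ then ((Nat.sqrt end_.toNat : Nat) : Int) else 0
  let base : List Int := sieveList (PySem.List.pyRange 2 (limit + 1) 1)
  let lo : Int := if start > 2 then start else 2
  let primes : List Int :=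
    (PySem.List.pyRange lo (end_ + 1) 1).filter
      (fun n => (base.filter (fun p => p * p ≤ n)).all (fun p => !(PySem.Int.mod n p == 0)))
  triangles_of primes

-- ===== PRECONDITION & SPEC =====
def Spec_find_triangles_and_perimeters (start : Int) (end_ : Int) (out : List (Int × Int × Int × Int)) : Prop := out = find_triangles_and_perimeters_alt start end_
instance (start : Int) (end_ : Int) (out : List (Int × Int × Int × Int)) : Decidable (Spec_find_triangles_and_perimeters start end_ out) := by unfold Spec_find_triangles_and_perimeters; infer_instance

-- ===== CLAIM (what is proved, stated in full; the proofs are below) =====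
def Claim_equal_find_triangles_and_perimeters : Prop := ∀ (start : Int) (end_ : Int), Dom_find_triangles_and_perimeters start end_ → Spec_find_triangles_and_perimeters start end_ (find_triangles_and_perimeters start end_)

-- ===== LEMMAS AND PROOFS =====

theorem int_dvd_iff_toNat (i n : Int) (hi : 0 ≤ i) (hn : 0 ≤ n) :
    i ∣ n ↔ i.toNat ∣ n.toNat := by
  rw [← Int.natCast_dvd_natCast, Int.toNat_of_nonneg hi, Int.toNat_of_nonneg hn]

-- A's trial division decides primality of n.toNat
theorem is_prime_eq (n : Int) : is_prime n = decide (Nat.Prime n.toNat) := by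
  by_cases hn : n < 2
  · have hnp : ¬ Nat.Prime n.toNat := fun hp => by have := hp.two_le; omega
    simp [is_prime, hn, hnp]
  · rw [not_lt] at hn
    have h0 : (0:Int) ≤ n := by omega
    simp only [is_prime, if_neg (not_lt.mpr hn)]
    rw [Bool.eq_iff_iff]
    simp only [List.all_eq_true, PySem.List.mem_pyRange_one, decide_eq_true_eq,
      Bool.not_eq_true', beq_eq_false_iff_ne, ne_eq, PySem.Int.mod_eq_zero_iff_dvd]
    rw [Nat.prime_def_le_sqrt]
    constructor
    · intro h
      refine ⟨by omega, fun m hm2 hms hmd => ?_⟩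
      have := h (m : Int) ⟨by exact_mod_cast hm2, by
        have : (m : Int) ≤ ((Nat.sqrt n.toNat : Nat) : Int) := by exact_mod_cast hms
        omega⟩
      exact this (((int_dvd_iff_toNat _ _ (by positivity) h0).mpr (by simpa using hmd)))
    · rintro ⟨-, h⟩ i ⟨hi2, his⟩ hid
      have hi0 : (0:Int) ≤ i := by omega
      have : i.toNat ≤ Nat.sqrt n.toNat := by omega
      exact h i.toNat (by omega) this ((int_dvd_iff_toNat _ _ hi0 h0).mp hid)

-- the list-filtering sieve keeps exactly the primes
theorem not_dvd_of_prime_gt (p x : Int) (hp2 : 2 ≤ p) (hpx : p < x)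
    (hxp : Nat.Prime x.toNat) : ¬ p ∣ x := by
  intro hd
  rcases hxp.eq_one_or_self_of_dvd p.toNat
    ((int_dvd_iff_toNat _ _ (by omega) (by omega)).mp hd) with h | h
  · omega
  · omega

theorem sieveList_eq_fuel : ∀ (k : Nat) (l : List Int), l.length ≤ k →
    (∀ x ∈ l, 2 ≤ x) → l.Pairwise (· < ·) →
    (∀ x ∈ l, ∀ q : Int, 2 ≤ q → Nat.Prime q.toNat → q ∣ x → q < x → q ∈ l) →
    sieveList l = l.filter (fun x => decide (Nat.Prime x.toNat)) := by
  intro k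
  induction k with
  | zero =>
    intro l hl _ _ _
    have : l = [] := List.eq_nil_of_length_eq_zero (by omega)
    subst this; rw [sieveList]; rfl
  | succ k ih =>
    intro l hl h2 hs hc
    match l with
    | [] => rw [sieveList]; rfl
    | p :: xs =>
      have hp2 : (2:Int) ≤ p := h2 p List.mem_cons_self
      have hlt : ∀ x ∈ xs, p < x := (List.pairwise_cons.mp hs).1
      -- the head survives every earlier sieving step, so it is prime
      have hpp : Nat.Prime p.toNat := by
        by_contra hnp
        have hne1 : p.toNat ≠ 1 := by omega
        have hq : Nat.Prime p.toNat.minFac := Nat.minFac_prime hne1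
        have hqd : (p.toNat.minFac : Int) ∣ p := by
          have := Nat.minFac_dvd p.toNat
          exact (int_dvd_iff_toNat _ _ (by positivity) (by omega)).mpr (by simpa using this)
        have hqlt : (p.toNat.minFac : Int) < p := by
          have hle : p.toNat.minFac ≤ p.toNat := Nat.minFac_le (by omega)
          have hne : p.toNat.minFac ≠ p.toNat := fun h => hnp (h ▸ hq)
          omega
        have hq2 : (2:Int) ≤ (p.toNat.minFac : Int) := by exact_mod_cast hq.two_le
        have := hc p List.mem_cons_self (p.toNat.minFac : Int) hq2 (by simpa using hq) hqd hqlt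
        rcases List.mem_cons.mp this with h | h
        · omega
        · have := hlt _ h; omega
      have hfcons : List.filter (fun x => decide (Nat.Prime x.toNat)) (p :: xs)
          = p :: List.filter (fun x => decide (Nat.Prime x.toNat)) xs := by
        simp [hpp]
      rw [sieveList, hfcons]
      congr 1
      set g : Int → Bool := fun x => !(PySem.Int.mod x p == 0) with hg
      have hgiff : ∀ x : Int, g x = true ↔ ¬ p ∣ x := by
        intro x
        simp [hg, PySem.Int.mod_eq_zero_iff_dvd]
      have hstep : sieveList (xs.filter g) =
          (xs.filter g).filter (fun x => decide (Nat.Prime x.toNat)) := by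
        apply ih
        · have := List.length_filter_le g xs
          simp at hl; omega
        · intro x hx; exact h2 x (List.mem_cons_of_mem _ (List.mem_of_mem_filter hx))
        · exact ((List.pairwise_cons.mp hs).2).sublist List.filter_sublist
        · intro x hx q hq2 hqp hqd hqlt
          have hxxs := List.mem_of_mem_filter hx
          have hgx : g x = true := List.of_mem_filter hx
          have := hc x (List.mem_cons_of_mem _ hxxs) q hq2 hqp hqd hqlt
          rcases List.mem_cons.mp this with h | h
          · exact absurd hqd (h ▸ ((hgiff x).mp hgx))
          · refine List.mem_filter.mpr ⟨h, (hgiff q).mpr ?_⟩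
            exact not_dvd_of_prime_gt p q hp2 (hlt _ h) hqp
      rw [hstep, List.filter_filter]
      apply List.filter_congr
      intro x hx
      by_cases hxp : Nat.Prime x.toNat
      · have : g x = true := (hgiff x).mpr (not_dvd_of_prime_gt p x hp2 (hlt _ hx) hxp)
        simp [hxp, this]
      · simp [hxp]

theorem sieveList_eq (l : List Int) (h2 : ∀ x ∈ l, 2 ≤ x) (hs : l.Pairwise (· < ·))
    (hc : ∀ x ∈ l, ∀ q : Int, 2 ≤ q → Nat.Prime q.toNat → q ∣ x → q < x → q ∈ l) :
    sieveList l = l.filter (fun x => decide (Nat.Prime x.toNat)) :=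
  sieveList_eq_fuel l.length l le_rfl h2 hs hc

theorem mem_sieve_range (limit q : Int) :
    q ∈ sieveList (PySem.List.pyRange 2 (limit + 1) 1) ↔
      2 ≤ q ∧ q ≤ limit ∧ Nat.Prime q.toNat := by
  rw [sieveList_eq]
  · rw [List.mem_filter, PySem.List.mem_pyRange_one]
    constructor
    · rintro ⟨⟨h1, h2⟩, h3⟩
      exact ⟨h1, by omega, by simpa using h3⟩
    · rintro ⟨h1, h2, h3⟩
      exact ⟨⟨h1, by omega⟩, by simpa using h3⟩
  · intro x hx; exact (PySem.List.mem_pyRange_one.mp hx).1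
  · exact PySem.List.pairwise_lt_pyRange_one _ _
  · intro x hx q' h2 _ _ hlt
    have hb := PySem.List.mem_pyRange_one.mp hx
    exact PySem.List.mem_pyRange_one.mpr ⟨h2, by omega⟩

-- B's window test decides primality for 2 ≤ n ≤ end_
theorem bpred_eq (end_ n : Int) (hn2 : 2 ≤ n) (hne : n ≤ end_) :
    (((sieveList (PySem.List.pyRange 2 (((Nat.sqrt end_.toNat : Nat) : Int) + 1) 1)).filter
        (fun p => p * p ≤ n)).all (fun p => !(PySem.Int.mod n p == 0)))
      = decide (Nat.Prime n.toNat) := by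
  rw [Bool.eq_iff_iff]
  simp only [List.all_eq_true, List.mem_filter, mem_sieve_range, decide_eq_true_eq,
    Bool.not_eq_true', beq_eq_false_iff_ne, ne_eq, PySem.Int.mod_eq_zero_iff_dvd]
  constructor
  · intro h
    by_contra hnp
    have hqpN : Nat.Prime n.toNat.minFac := Nat.minFac_prime (by omega)
    have hsqN : n.toNat.minFac * n.toNat.minFac ≤ n.toNat := by
      simpa [pow_two] using Nat.minFac_sq_le_self (n := n.toNat) (by omega) hnp
    have hlimN : n.toNat.minFac ≤ Nat.sqrt end_.toNat := by
      apply Nat.le_sqrt.mpr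
      omega
    have hq2 : (2:Int) ≤ (n.toNat.minFac : Int) := by exact_mod_cast hqpN.two_le
    have hqd : (n.toNat.minFac : Int) ∣ n := (int_dvd_iff_toNat _ _ (by omega) (by omega)).mpr
      (by simpa using Nat.minFac_dvd n.toNat)
    have hqsq : (n.toNat.minFac : Int) * (n.toNat.minFac : Int) ≤ n := by
      have h1 : ((n.toNat.minFac * n.toNat.minFac : Nat) : Int) ≤ ((n.toNat : Nat) : Int) :=
        Int.ofNat_le.mpr hsqN
      push_cast at h1
      omega
    have hqlim : (n.toNat.minFac : Int) ≤ ((Nat.sqrt end_.toNat : Nat) : Int) := by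
      exact_mod_cast hlimN
    exact (h (n.toNat.minFac : Int) ⟨⟨hq2, hqlim, by simpa using hqpN⟩, hqsq⟩) hqd
  · intro hp p ⟨⟨hp2, _, hpp⟩, hpsq⟩ hpd
    rcases hp.eq_one_or_self_of_dvd p.toNat
      ((int_dvd_iff_toNat _ _ (by omega) (by omega)).mp hpd) with h | h
    · omega
    · have : p = n := by omega
      subst this
      nlinarith

-- a filter false below t may start the range at t
theorem filter_pyRange_drop_low (p : Int → Bool) (t E : Int)
    (hp : ∀ n : Int, n < t → p n = false) :
    ∀ s : Int, s ≤ t →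
      (PySem.List.pyRange s E 1).filter p = (PySem.List.pyRange t E 1).filter p := by
  suffices h : ∀ (k : Nat) (s : Int), s ≤ t → (t - s).toNat = k →
      (PySem.List.pyRange s E 1).filter p = (PySem.List.pyRange t E 1).filter p by
    intro s hst; exact h (t - s).toNat s hst rfl
  intro k
  induction k with
  | zero =>
    intro s hst hk
    have : s = t := by omega
    rw [this]
  | succ k ih =>
    intro s hst hk
    have hslt : s < t := by omega
    by_cases hE : E ≤ s
    · rw [PySem.List.pyRange_one_eq_nil hE, PySem.List.pyRange_one_eq_nil (by omega)]
    · rw [PySem.List.pyRange_one_cons (by omega), List.filter_cons_of_neg (by simp [hp s hslt])]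
      exact ih (s + 1) (by omega) (by omega)

theorem is_prime_lt (n : Int) (h : n < 2) : is_prime n = false := by
  simp [is_prime, h]

-- ===== VERDICT (by name: the statement is the Claim_ definition above) =====
theorem find_triangles_and_perimeters_spec : Claim_equal_find_triangles_and_perimeters := by
  intro start end_ _
  unfold Spec_find_triangles_and_perimeters
  simp only [find_triangles_and_perimeters, find_triangles_and_perimeters_alt]
  congr 1
  by_cases hstart : start > 2
  · rw [if_pos hstart]
    apply List.filter_congr
    intro n hn
    obtain ⟨hn1, hn2⟩ := PySem.List.mem_pyRange_one.mp hn
    have hn2' : n ≤ end_ := by omega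
    have hend : (0:Int) ≤ end_ := by omega
    rw [is_prime_eq, if_pos hend, ← bpred_eq end_ n (by omega) hn2']
  · rw [if_neg hstart]
    rw [filter_pyRange_drop_low (fun num => is_prime num) 2 (end_ + 1)
      (fun n hn => is_prime_lt n hn) start (by omega)]
    apply List.filter_congr
    intro n hn
    obtain ⟨hn1, hn2⟩ := PySem.List.mem_pyRange_one.mp hn
    have hn2' : n ≤ end_ := by omega
    have hend : (0:Int) ≤ end_ := by omega
    rw [is_prime_eq, if_pos hend, ← bpred_eq end_ n (by omega) hn2']
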